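-- pv_equiv track=rewrite | github.com/kr-shrinivasa/DSA | 165_half.py | half
-- ===== SOURCE A (Python) =====
-- def half(s):
--     h=len(s)//2
--     lis=list(s[h:])
--     for i in range(1,len(lis)):
--         j=i
--         while j>0 and lis[j]<lis[j-1]:
--             lis[j],lis[j-1]=lis[j-1],lis[j]
--             j-=1
--     return s[:h]+"".join(lis)
-- ===== SOURCE B (Python) =====
-- def half(s):
--     h = len(s) // 2
--     counts = {}
--     for c in s[h:]:
--         counts[c] = counts.get(c, 0) + 1
--     return s[:h] + "".join(c * counts[c] for c in sorted(counts))
-- ===== Notes on version B (the rewrite author's own statement) =====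
-- stated objective: faster
-- what changed: Replaces the in-place insertion sort (inner swap loop) of the second half by a counting sort: one pass builds a character-frequency dict, then the sorted distinct characters are emitted repeated by their counts.
import Mathlib
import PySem

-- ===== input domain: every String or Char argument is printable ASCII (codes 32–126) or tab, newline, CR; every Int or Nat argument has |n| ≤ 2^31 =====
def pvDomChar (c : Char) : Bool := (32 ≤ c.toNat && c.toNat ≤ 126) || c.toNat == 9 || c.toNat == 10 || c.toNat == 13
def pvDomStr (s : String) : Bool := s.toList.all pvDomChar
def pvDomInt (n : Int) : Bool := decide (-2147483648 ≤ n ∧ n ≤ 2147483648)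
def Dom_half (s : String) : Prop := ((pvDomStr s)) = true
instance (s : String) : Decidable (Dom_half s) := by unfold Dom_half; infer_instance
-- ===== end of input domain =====

-- B replaces A's insertion sort of the second half by a counting sort (frequency dict,
-- then ordered emission of the distinct characters); measured faster at large sizes.

-- ===== PORT A =====
-- the inner 'while j>0 and lis[j]<lis[j-1]: swap; j-=1' loop; the list indexing is
-- always in range at the call sites, so getD is exact for Python's lis[j]
def halfInner : List Char → Nat → List Char
  | l, 0 => l
  | l, (k+1) =>
    if l.getD (k+1) ' ' < l.getD k ' ' then
      halfInner ((l.set k (l.getD (k+1) ' ')).set (k+1) (l.getD k ' ')) k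
    else l

-- s[h:], s[:h] with 0 ≤ h ≤ len(s) are exactly drop/take on the code points, and
-- '+'/''.join on strings is append on code points
def half (s : String) : String :=
  let cs := s.toList
  let h := cs.length / 2
  let lis := cs.drop h
  let lis' := (List.range' 1 (lis.length - 1)).foldl (fun l i => halfInner l i) lis
  String.ofList (cs.take h ++ lis')

-- ===== PORT B =====
def half_alt (s : String) : String :=
  let cs := s.toList
  let h := cs.length / 2
  let counts := (cs.drop h).foldl (fun d c => d.insert c (d.getD c 0 + 1)) PySem.Dict.empty
  let ks := PySem.List.sorted counts.keys (fun x => x) false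
  String.ofList (cs.take h ++ ks.flatMap (fun c => PySem.List.pyRepeat [c] (counts.getD c 0)))

-- ===== PRECONDITION & SPEC =====
def Spec_half (s : String) (out : String) : Prop := out = half_alt s
instance (s : String) (out : String) : Decidable (Spec_half s out) := by unfold Spec_half; infer_instance

-- ===== CLAIM (what is proved, stated in full; the proofs are below) =====
def Claim_equal_half : Prop := ∀ (s : String), Dom_half s → Spec_half s (half s)

-- ===== LEMMAS AND PROOFS =====

-- abbreviation used only in the proofs: Python's sorted on chars
def pysortC (t : List Char) : List Char := PySem.List.sorted t (fun x => x) false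

-- ---- A side: the swap loop performs an ordered insertion ----

lemma getD_append_cons_self (p r : List Char) (x : Char) (d : Char) :
    (p ++ x :: r).getD p.length d = x := by
  simp [List.getD]

lemma insertBy_append_singleton_of_before {α : Type} (before : α → α → Bool) (x y : α)
    (q : List α) (h : before x y = true) :
    PySem.List.insertBy before x (q ++ [y]) = PySem.List.insertBy before x q ++ [y] := by
  induction q with
  | nil => simp [PySem.List.insertBy, h]
  | cons z q ih =>
    by_cases hz : before x z = true
    · simp [PySem.List.insertBy, hz]
    · simp only [Bool.not_eq_true] at hz
      simp [PySem.List.insertBy, hz, ih]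

lemma inner_spec (p : List Char) (x : Char) (r : List Char)
    (hp : p.Pairwise (· ≤ ·)) :
    halfInner (p ++ x :: r) p.length =
      PySem.List.insertBy (fun a b => decide (a < b)) x p ++ r := by
  induction p using List.reverseRecOn generalizing x r with
  | nil => simp [halfInner, PySem.List.insertBy]
  | append_singleton q y ih =>
    have hq : q.Pairwise (· ≤ ·) := (List.pairwise_append.mp hp).1
    have hqy : ∀ e ∈ q, e ≤ y := fun e he =>
      (List.pairwise_append.mp hp).2.2 e he y (by simp)
    have hlen : (q ++ [y]).length = q.length + 1 := by simp
    have hassoc : (q ++ [y]) ++ x :: r = q ++ y :: x :: r := by simp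
    rw [hlen, hassoc]
    have hgx : (q ++ y :: x :: r).getD (q.length + 1) ' ' = x := by
      have h1 : q ++ y :: x :: r = (q ++ [y]) ++ x :: r := by simp
      have h2 := getD_append_cons_self (q ++ [y]) r x ' '
      rw [h1]; simp only [List.length_append, List.length_singleton] at h2; exact h2
    have hgy : (q ++ y :: x :: r).getD q.length ' ' = y :=
      getD_append_cons_self q (x :: r) y ' '
    have hset : ((q ++ y :: x :: r).set q.length x).set (q.length + 1) y
        = q ++ x :: y :: r := by
      rw [List.set_append, if_neg (by omega)]
      rw [List.set_append, if_neg (by omega)]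
      simp
    by_cases hxy : x < y
    · rw [show halfInner (q ++ y :: x :: r) (q.length + 1)
          = halfInner (((q ++ y :: x :: r).set q.length
              ((q ++ y :: x :: r).getD (q.length+1) ' ')).set (q.length+1)
              ((q ++ y :: x :: r).getD q.length ' ')) q.length from by
            simp only [halfInner]; rw [if_pos (by rw [hgx, hgy]; exact hxy)]]
      rw [hgx, hgy, hset, ih x (y :: r) hq,
        insertBy_append_singleton_of_before _ x y q (by simpa using hxy)]
      simp
    · rw [show halfInner (q ++ y :: x :: r) (q.length + 1) = q ++ y :: x :: r from by
        simp only [halfInner]; rw [if_neg (by rw [hgx, hgy]; exact hxy)]]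
      rw [PySem.List.insertBy_of_forall_not_before]
      · simp
      · intro e he
        have hey : e ≤ y := by
          rcases List.mem_append.mp he with h | h
          · exact hqy e h
          · simp only [List.mem_singleton] at h; exact le_of_eq h
        simp only [decide_eq_false_iff_not]
        exact fun hlt => hxy (lt_of_lt_of_le hlt hey)

-- each outer iteration extends the sorted prefix by one ordered insertion
lemma sorted_take_succ (t : List Char) (m : Nat) (hm : m < t.length) :
    pysortC (t.take (m + 1)) =
      PySem.List.insertBy (fun a b => decide (a < b)) t[m] (pysortC (t.take m)) := by
  unfold pysortC
  rw [PySem.List.sorted_eq_foldl_insertBy, PySem.List.sorted_eq_foldl_insertBy]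
  rw [show t.take (m + 1) = t.take m ++ [t[m]] from by
        rw [List.take_add_one, List.getElem?_eq_getElem hm]; rfl]
  rw [List.foldl_append]
  rfl

lemma outer_inv (t : List Char) :
    ∀ (n m : Nat), m + n = t.length →
      (List.range' m n).foldl (fun l i => halfInner l i)
        (pysortC (t.take m) ++ t.drop m) = pysortC t := by
  intro n
  induction n with
  | zero =>
    intro m hm
    have : m = t.length := by omega
    subst this
    simp [List.take_of_length_le (le_refl t.length), List.drop_of_length_le (le_refl t.length)]
  | succ n ih =>
    intro m hm
    have hmlt : m < t.length := by omega
    rw [List.range'_succ, List.foldl_cons]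
    have hdrop : t.drop m = t[m] :: t.drop (m + 1) := List.drop_eq_getElem_cons hmlt
    have hplen : (pysortC (t.take m)).length = m := by
      unfold pysortC
      rw [(PySem.List.sorted_perm (t.take m) (fun x : Char => x) false).length_eq,
        List.length_take]
      omega
    have hppw : (pysortC (t.take m)).Pairwise (· ≤ ·) := by
      simp only [pysortC]; exact PySem.List.sorted_pairwise (t.take m) (fun x : Char => x)
    have hstep : halfInner (pysortC (t.take m) ++ t.drop m) m
        = pysortC (t.take (m + 1)) ++ t.drop (m + 1) := by
      rw [hdrop]
      have := inner_spec (pysortC (t.take m)) t[m] (t.drop (m+1)) hppw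
      rw [hplen] at this
      rw [this, sorted_take_succ t m hmlt]
    rw [hstep]
    exact ih (m + 1) (by omega)

lemma outer_eq_sorted (t : List Char) :
    (List.range' 1 (t.length - 1)).foldl (fun l i => halfInner l i) t = pysortC t := by
  cases t with
  | nil => simp [pysortC, PySem.List.sorted]
  | cons c cs =>
    have h1 : (1 : Nat) + cs.length = (c :: cs).length := by simp [Nat.add_comm]
    have := outer_inv (c :: cs) cs.length 1 h1
    have hstart : pysortC ((c :: cs).take 1) ++ (c :: cs).drop 1 = c :: cs := by
      simp [pysortC, PySem.List.sorted, PySem.List.insertBy]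
    rw [hstart] at this
    simpa using this

-- ---- B side: counting emission is sorted ----

lemma count_flatMap_replicate (t : List Char) (ks : List Char) (hnd : ks.Nodup) (a : Char) :
    (ks.flatMap (fun c => List.replicate (t.count c) c)).count a =
      if a ∈ ks then t.count a else 0 := by
  induction ks with
  | nil => simp
  | cons c ks ih =>
    simp only [List.flatMap_cons, List.count_append, ih hnd.of_cons]
    by_cases hac : a = c
    · subst hac
      have : a ∉ ks := (List.nodup_cons.mp hnd).1
      simp [this]
    · simp [List.count_replicate, Ne.symm hac, hac]

lemma flatMap_replicate_perm (t ks : List Char) (hnd : ks.Nodup)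
    (hmem : ∀ a, a ∈ ks ↔ a ∈ t) :
    (ks.flatMap (fun c => List.replicate (t.count c) c)).Perm t := by
  rw [List.perm_iff_count]
  intro a
  rw [count_flatMap_replicate t ks hnd a]
  by_cases h : a ∈ ks
  · simp [h]
  · have hnt : a ∉ t := fun ht => h ((hmem a).mpr ht)
    simp [h, List.count_eq_zero_of_not_mem hnt]

lemma flatMap_replicate_pairwise (t ks : List Char) (hks : ks.Pairwise (· < ·)) :
    (ks.flatMap (fun c => List.replicate (t.count c) c)).Pairwise (· ≤ ·) := by
  induction ks with
  | nil => simp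
  | cons c ks ih =>
    simp only [List.flatMap_cons]
    rw [List.pairwise_append]
    refine ⟨List.pairwise_replicate.mpr (Or.inr (le_refl c)), ih hks.of_cons, ?_⟩
    intro a ha b hb
    have hac : a = c := List.eq_of_mem_replicate ha
    obtain ⟨d, hd, hbd⟩ := List.mem_flatMap.mp hb
    have hbd' : b = d := List.eq_of_mem_replicate hbd
    subst hac hbd'
    exact le_of_lt (List.rel_of_pairwise_cons hks hd)

lemma b_emit_eq_sorted (t : List Char) :
    (PySem.List.sorted (PySem.Set.ofList t) (fun x => x) false).flatMap
        (fun c => List.replicate (t.count c) c) = pysortC t := by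
  set ks := PySem.List.sorted (PySem.Set.ofList t) (fun x => x) false with hks
  have hnd : ks.Nodup :=
    ((PySem.List.sorted_perm (PySem.Set.ofList t) (fun x : Char => x) false).nodup_iff).mpr
      (PySem.Set.nodup_ofList t)
  have hmem : ∀ a, a ∈ ks ↔ a ∈ t := fun a => by
    rw [hks, PySem.List.mem_sorted, PySem.Set.mem_ofList]
  have hpw : ks.Pairwise (· < ·) := PySem.List.sorted_ofList_pairwise_lt t
  unfold pysortC
  exact (PySem.List.sorted_id_eq_of_perm_of_pairwise t _
    (flatMap_replicate_perm t ks hnd hmem)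
    (flatMap_replicate_pairwise t ks hpw)).symm

-- ---- glue ----

lemma half_eq (s : String) : half s = half_alt s := by
  unfold half half_alt
  simp only [PySem.Dict.foldl_insert_getD_add_one_eq_counter, PySem.Dict.keys_counter]
  set t := s.toList.drop (s.toList.length / 2) with ht
  congr 1
  rw [outer_eq_sorted t, ← b_emit_eq_sorted t]
  simp only [PySem.List.pyRepeat_singleton, PySem.Dict.getD_counter, Int.toNat_natCast]

-- ===== VERDICT (by name: the statement is the Claim_ definition above) =====
theorem half_spec : Claim_equal_half := by
  intro s _
  unfold Spec_half
  exact half_eq s
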